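-- pv_equiv track=rewrite | github.com/ckoons/BubbleSpacetimeTheory | play/toy_406_so72_rallis.py | count_reps_large
-- ===== SOURCE A (Python) =====
-- from collections import defaultdict
-- from itertools import product as iter_product
--
-- def count_reps_large(diag, target, bound):
--     """Count representations for larger dimensions using split enumeration.
--     Split into positive and negative parts.
--     v^T Q v = sum_{i: Q_ii=1} v_i^2 - sum_{j: Q_jj=-1} v_j^2 = target
--     So: sum_pos - sum_neg = target, i.e., sum_pos = target + sum_neg.
--     """
--     d = len(diag)
--     pos_idx = [i for i in range(d) if diag[i] > 0]
--     neg_idx = [i for i in range(d) if diag[i] < 0]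
--     n_pos = len(pos_idx)
--     n_neg = len(neg_idx)
--
--     # Enumerate all possible negative sums
--     neg_sums = defaultdict(int)
--     for v_neg in iter_product(range(-bound, bound + 1), repeat=n_neg):
--         s = sum(x * x for x in v_neg)
--         neg_sums[s] += 1
--
--     # For each negative sum, count positive vectors with sum = target + neg_sum
--     pos_sum_counts = defaultdict(int)
--     for v_pos in iter_product(range(-bound, bound + 1), repeat=n_pos):
--         s = sum(x * x for x in v_pos)
--         pos_sum_counts[s] += 1
--
--     count = 0
--     for s_neg, c_neg in neg_sums.items():
--         needed_pos = target + s_neg  # sum_pos = target + sum_neg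
--         if needed_pos in pos_sum_counts:
--             count += c_neg * pos_sum_counts[needed_pos]
--
--     return count
-- ===== SOURCE B (Python) =====
-- def count_reps_large(diag, target, bound):
--     """Count representations via n-fold convolution of the 1D square-sum
--     histogram per sign group (polynomial power), instead of enumerating
--     all (2*bound+1)^n vectors."""
--     hist = {}
--     for x in range(-bound, bound + 1):
--         q = x * x
--         hist[q] = hist.get(q, 0) + 1
--
--     def power(n):
--         dist = {0: 1}
--         for _ in range(n):
--             nd = {}
--             for s, c in dist.items():
--                 for q, h in hist.items():
--                     nd[s + q] = nd.get(s + q, 0) + c * h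
--             dist = nd
--         return dist
--
--     n_pos = sum(1 for x in diag if x > 0)
--     n_neg = sum(1 for x in diag if x < 0)
--     P = power(n_pos)
--     N = power(n_neg)
--     return sum(c * P.get(target + s, 0) for s, c in N.items())
-- ===== Notes on version B (the rewrite author's own statement) =====
-- stated objective: faster
-- what changed: Replaces exhaustive enumeration of all (2b+1)^n sign-group vectors with n-fold convolution (polynomial power) of the one-dimensional histogram of squares, then matches the two sum distributions.
import Mathlib
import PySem

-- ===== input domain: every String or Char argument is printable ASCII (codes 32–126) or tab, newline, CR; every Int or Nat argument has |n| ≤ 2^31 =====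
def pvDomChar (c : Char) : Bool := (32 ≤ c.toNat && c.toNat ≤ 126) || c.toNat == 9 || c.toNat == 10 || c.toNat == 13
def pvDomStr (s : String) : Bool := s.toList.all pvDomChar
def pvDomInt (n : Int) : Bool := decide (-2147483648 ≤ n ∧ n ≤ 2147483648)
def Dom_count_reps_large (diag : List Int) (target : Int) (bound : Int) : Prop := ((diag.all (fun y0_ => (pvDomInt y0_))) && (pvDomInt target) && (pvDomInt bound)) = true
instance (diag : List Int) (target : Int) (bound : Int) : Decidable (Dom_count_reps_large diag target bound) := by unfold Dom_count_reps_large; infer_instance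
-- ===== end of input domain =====

-- B replaces A's exhaustive (2b+1)^n vector enumeration per sign group by an n-fold
-- convolution (polynomial power) of the 1D histogram of squares; same return value.


-- ===== PORT A =====
-- itertools.product(range(-bound, bound+1), repeat=n): leftmost coordinate varies slowest
def pyProdRep (r : List Int) : Nat → List (List Int)
  | 0 => [[]]
  | n + 1 => r.flatMap (fun x => (pyProdRep r n).map (fun v => x :: v))

-- sum(x * x for x in v)
def sumsq (v : List Int) : Int := (v.map (fun x => x * x)).sum

def count_reps_large (diag : List Int) (target : Int) (bound : Int) : Int :=
  let d : Int := diag.length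
  let pos_idx := (PySem.List.pyRange 0 d 1).filter (fun i => decide (0 < PySem.List.pyGetD diag i 0))
  let neg_idx := (PySem.List.pyRange 0 d 1).filter (fun i => decide (PySem.List.pyGetD diag i 0 < 0))
  let n_pos := pos_idx.length
  let n_neg := neg_idx.length
  -- neg_sums[s] += 1 over all candidate vectors (defaultdict counter)
  let neg_sums := (pyProdRep (PySem.List.pyRange (-bound) (bound + 1) 1) n_neg).foldl
    (fun dd v => dd.insert (sumsq v) (dd.getD (sumsq v) 0 + 1)) PySem.Dict.empty
  let pos_sum_counts := (pyProdRep (PySem.List.pyRange (-bound) (bound + 1) 1) n_pos).foldl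
    (fun dd v => dd.insert (sumsq v) (dd.getD (sumsq v) 0 + 1)) PySem.Dict.empty
  neg_sums.items.foldl (fun count p =>
    if pos_sum_counts.contains (target + p.1) then count + p.2 * pos_sum_counts.getD (target + p.1) 0
    else count) 0

-- ===== PORT B =====
-- hist[q] = hist.get(q, 0) + 1 over q = x*x, x in range(-bound, bound+1)
def histB (bound : Int) : PySem.Dict Int Int :=
  (PySem.List.pyRange (-bound) (bound + 1) 1).foldl
    (fun dd x => dd.insert (x * x) (dd.getD (x * x) 0 + 1)) PySem.Dict.empty

-- one convolution round: nd[s+q] = nd.get(s+q, 0) + c*h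
def convStep (hist : PySem.Dict Int Int) (dist : PySem.Dict Int Int) : PySem.Dict Int Int :=
  dist.items.foldl (fun nd sc =>
    (hist.items).foldl (fun nd qh => nd.insert (sc.1 + qh.1) (nd.getD (sc.1 + qh.1) 0 + sc.2 * qh.2)) nd)
    PySem.Dict.empty

-- power(n): dist = {0: 1}; n convolution rounds
def powerDist (hist : PySem.Dict Int Int) : Nat → PySem.Dict Int Int
  | 0 => PySem.Dict.empty.insert 0 1
  | n + 1 => convStep hist (powerDist hist n)

def count_reps_large_alt (diag : List Int) (target : Int) (bound : Int) : Int :=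
  let hist := histB bound
  let n_pos := diag.countP (fun x => decide (0 < x))
  let n_neg := diag.countP (fun x => decide (x < 0))
  let P := powerDist hist n_pos
  let N := powerDist hist n_neg
  (N.items.map (fun sc => sc.2 * P.getD (target + sc.1) 0)).sum

-- ===== PRECONDITION & SPEC =====
def Spec_count_reps_large (diag : List Int) (target : Int) (bound : Int) (out : Int) : Prop := out = count_reps_large_alt diag target bound
instance (diag : List Int) (target : Int) (bound : Int) (out : Int) : Decidable (Spec_count_reps_large diag target bound out) := by unfold Spec_count_reps_large; infer_instance

-- ===== CLAIM (what is proved, stated in full; the proofs are below) =====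
def Claim_equal_count_reps_large : Prop := ∀ (diag : List Int) (target : Int) (bound : Int), Dom_count_reps_large diag target bound → Spec_count_reps_large diag target bound (count_reps_large diag target bound)

-- ===== LEMMAS AND PROOFS =====

lemma dict_empty_items : (PySem.Dict.empty : PySem.Dict Int Int).items = [] := rfl

-- weighted sum of a dict's item list: Σ value * g key
def gsum (g : Int → Int) (l : List (Int × Int)) : Int := (l.map (fun p => p.2 * g p.1)).sum

-- updating the (unique) entry at key k adds a * g k to the weighted sum (raw item-list form)
lemma gsum_map_update (g : Int → Int) (k v a : Int) :
    ∀ (l : List (Int × Int)), (l.map (·.1)).Nodup → (k, v) ∈ l →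
    gsum g (l.map (fun p => if p.1 == k then (k, v + a) else p)) = gsum g l + a * g k := by
  intro l
  induction l with
  | nil => intro _ h; cases h
  | cons p t ih =>
    intro hnd hmem
    simp only [List.map_cons, List.nodup_cons] at hnd
    by_cases hk : p.1 = k
    · have hpv : p = (k, v) := by
        rcases List.mem_cons.mp hmem with h | h
        · exact h.symm
        · exact absurd (hk ▸ (List.mem_map_of_mem (f := (·.1)) h : (k, v).1 ∈ t.map (·.1))) (hk ▸ hnd.1)
      subst hpv
      have ht : t.map (fun p => if p.1 == k then (k, v + a) else p) = t := by
        conv_rhs => rw [← List.map_id t]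
        apply List.map_congr_left
        intro q hq
        have hq1 : q.1 ≠ k := fun h => hnd.1 (h ▸ List.mem_map_of_mem (f := (·.1)) hq)
        simp [hq1]
      simp only [List.map_cons, ht, gsum, List.sum_cons, beq_self_eq_true, if_true]
      ring
    · have hmem' : (k, v) ∈ t := by
        rcases List.mem_cons.mp hmem with h | h
        · exact absurd (congrArg Prod.fst h.symm) hk
        · exact h
      have hrec := ih hnd.2 hmem'
      simp only [gsum, List.map_cons, List.sum_cons] at hrec ⊢
      have hbe : (p.1 == k) = false := by simpa using hk
      simp only [hbe, Bool.false_eq_true, if_false]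
      rw [hrec]
      ring

-- inserting (getD + a) at key k adds a * g k to the weighted items sum
lemma gsum_insert_add (g : Int → Int) (d : PySem.Dict Int Int) (hnd : d.keys.Nodup) (k a : Int) :
    gsum g ((d.insert k (d.getD k 0 + a)).items) = gsum g d.items + a * g k := by
  by_cases hc : d.contains k = true
  · have hs : (d.get? k).isSome := by rw [← PySem.Dict.contains_eq_isSome_get?]; exact hc
    obtain ⟨v, hv⟩ := Option.isSome_iff_exists.mp hs
    rw [PySem.Dict.getD_of_get?_eq_some d 0 hv,
        PySem.Dict.items_insert_of_contains d (v + a) hc]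
    have hnd' : (d.items.map (·.1)).Nodup := by simpa only [PySem.Dict.keys] using hnd
    exact gsum_map_update g k v a d.items hnd' (PySem.Dict.mem_items_of_get?_eq_some d hv)
  · have hc' : d.contains k = false := by simpa using hc
    rw [PySem.Dict.items_insert_of_not_contains d _ hc',
        PySem.Dict.getD_of_not_contains d 0 hc']
    simp [gsum]

-- a whole insert/getD-accumulation loop adds Σ F x * g (K x)
lemma gsum_foldl_insert_add {α : Type} (g : Int → Int) (K F : α → Int) :
    ∀ (l : List α) (d : PySem.Dict Int Int), d.keys.Nodup →
    gsum g ((l.foldl (fun dd x => dd.insert (K x) (dd.getD (K x) 0 + F x)) d).items)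
      = gsum g d.items + (l.map (fun x => F x * g (K x))).sum := by
  intro l
  induction l with
  | nil => intro d _; simp
  | cons x t ih =>
    intro d hnd
    simp only [List.foldl_cons, List.map_cons, List.sum_cons]
    rw [ih _ (PySem.Dict.nodup_keys_insert _ _ _ hnd), gsum_insert_add g d hnd]
    ring

-- keys stay nodup through the accumulation loop
lemma nodup_foldl_insert_add {α : Type} (K F : α → Int) (l : List α) (d : PySem.Dict Int Int)
    (hnd : d.keys.Nodup) :
    ((l.foldl (fun dd x => dd.insert (K x) (dd.getD (K x) 0 + F x)) d)).keys.Nodup :=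
  PySem.Dict.nodup_keys_foldl_insert_key l K (fun dd x => dd.getD (K x) 0 + F x) d hnd

-- weighted sum with an indicator weight extracts getD
lemma gsum_indicator (t : Int) (d : PySem.Dict Int Int) (hnd : d.keys.Nodup) :
    gsum (fun u => if u = t then 1 else 0) d.items = d.getD t 0 := by
  by_cases hc : d.contains t = true
  · have hs : (d.get? t).isSome := by rw [← PySem.Dict.contains_eq_isSome_get?]; exact hc
    obtain ⟨v, hv⟩ := Option.isSome_iff_exists.mp hs
    rw [PySem.Dict.getD_of_get?_eq_some d 0 hv]
    have hmem : (t, v) ∈ d.items := PySem.Dict.mem_items_of_get?_eq_some d hv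
    have hnd' : (d.items.map (·.1)).Nodup := by simpa only [PySem.Dict.keys] using hnd
    clear hv hs hc hnd
    generalize d.items = l at hmem hnd'
    induction l with
    | nil => cases hmem
    | cons p r ih =>
      simp only [List.map_cons, List.nodup_cons] at hnd'
      by_cases hp : p.1 = t
      · have hpv : p = (t, v) := by
          rcases List.mem_cons.mp hmem with h | h
          · exact h.symm
          · exact absurd (hp ▸ (List.mem_map_of_mem (f := (·.1)) h : (t, v).1 ∈ r.map (·.1))) (hp ▸ hnd'.1)
        subst hpv
        have hz : gsum (fun u => if u = t then 1 else 0) r = 0 := by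
          simp only [gsum]
          apply List.sum_eq_zero
          intro x hx
          obtain ⟨q, hq, hxq⟩ := List.mem_map.mp hx
          have hq1 : q.1 ≠ t := fun h => hnd'.1 (h ▸ List.mem_map_of_mem (f := (·.1)) hq)
          simp [← hxq, hq1]
        simp only [gsum, List.map_cons, List.sum_cons]
        simp only [gsum] at hz
        rw [hz]
        simp
      · have hmem' : (t, v) ∈ r := by
          rcases List.mem_cons.mp hmem with h | h
          · exact absurd (congrArg Prod.fst h.symm) hp
          · exact h
        simp only [gsum, List.map_cons, List.sum_cons] at ih ⊢
        rw [if_neg hp, mul_zero, zero_add]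
        exact ih hmem' hnd'.2
  · have hc' : d.contains t = false := by simpa using hc
    rw [PySem.Dict.getD_of_not_contains d 0 hc']
    simp only [gsum]
    apply List.sum_eq_zero
    intro x hx
    obtain ⟨q, hq, hxq⟩ := List.mem_map.mp hx
    have hqt : q.1 ≠ t := by
      intro h
      have hmemk : t ∈ d.keys := by
        simpa only [PySem.Dict.keys, h] using (List.mem_map_of_mem hq : q.1 ∈ d.items.map (·.1))
      rw [← PySem.Dict.contains_iff_mem_keys] at hmemk
      rw [hc'] at hmemk
      cases hmemk
    simp [← hxq, hqt]

-- double list sums commute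
lemma sum_sum_comm {α β : Type} (A : List α) (B : List β) (f : α → β → Int) :
    (A.map (fun a => ((B.map (f a)).sum))).sum = (B.map (fun b => (A.map (fun a => f a b)).sum)).sum := by
  induction A with
  | nil =>
    simp only [List.map_nil, List.sum_nil]
    rw [eq_comm]
    apply List.sum_eq_zero
    intro x hx
    obtain ⟨b, _, hb⟩ := List.mem_map.mp hx
    simp [← hb]
  | cons a t ih =>
    simp only [List.map_cons, List.sum_cons, ih, ← PySem.List.sum_map_add_int]

-- sum over flatMap = sum of the inner sums
lemma sum_flatMap {α : Type} (l : List α) (f : α → List Int) :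
    (l.flatMap f).sum = (l.map (fun a => (f a).sum)).sum := by
  induction l with
  | nil => simp
  | cons a t ih => simp [List.flatMap_cons, List.sum_append, ih]

-- histogram weighted sum = sum over the range of squares
lemma gsum_histB (bound : Int) (g : Int → Int) :
    gsum g (histB bound).items
      = ((PySem.List.pyRange (-bound) (bound + 1) 1).map (fun x => g (x * x))).sum := by
  unfold histB
  rw [gsum_foldl_insert_add g (fun x => x * x) (fun _ => 1) _ _ PySem.Dict.nodup_keys_empty]
  simp [gsum, dict_empty_items]

-- keys of convStep are nodup
lemma nodup_convStep (hist dist : PySem.Dict Int Int) : (convStep hist dist).keys.Nodup := by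
  unfold convStep
  have h : ∀ (l : List (Int × Int)) (nd : PySem.Dict Int Int), nd.keys.Nodup →
      ((l.foldl (fun (nd : PySem.Dict Int Int) (sc : Int × Int) =>
        (hist.items).foldl (fun (nd : PySem.Dict Int Int) (qh : Int × Int) => nd.insert (sc.1 + qh.1) (nd.getD (sc.1 + qh.1) 0 + sc.2 * qh.2)) nd) nd)).keys.Nodup := by
    intro l
    induction l with
    | nil => intro nd hnd; exact hnd
    | cons sc t ih =>
      intro nd hnd
      exact ih _ (nodup_foldl_insert_add (fun qh : Int × Int => sc.1 + qh.1) (fun qh : Int × Int => sc.2 * qh.2) _ _ hnd)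
  exact h _ _ PySem.Dict.nodup_keys_empty

-- sumsq of a cons
lemma sumsq_cons (x : Int) (v : List Int) : sumsq (x :: v) = x * x + sumsq v := by
  simp [sumsq]

-- the convolution power distribution counts sums of squares of product vectors
lemma powerDist_inv (bound : Int) (n : Nat) :
    (powerDist (histB bound) n).keys.Nodup ∧
    ∀ g : Int → Int, gsum g (powerDist (histB bound) n).items
      = ((pyProdRep (PySem.List.pyRange (-bound) (bound + 1) 1) n).map (fun v => g (sumsq v))).sum := by
  induction n with
  | zero =>
    constructor
    · exact PySem.Dict.nodup_keys_insert _ _ _ PySem.Dict.nodup_keys_empty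
    · intro g
      rw [show (powerDist (histB bound) 0) = PySem.Dict.empty.insert 0 1 from rfl,
          PySem.Dict.items_insert_of_not_contains _ _ (PySem.Dict.contains_empty 0)]
      simp [gsum, pyProdRep, sumsq, dict_empty_items]
  | succ n ih =>
    obtain ⟨ihnd, ihg⟩ := ih
    refine ⟨nodup_convStep _ _, ?_⟩
    intro g
    have houter : ∀ (l : List (Int × Int)) (nd : PySem.Dict Int Int), nd.keys.Nodup →
        gsum g ((l.foldl (fun (nd : PySem.Dict Int Int) (sc : Int × Int) =>
          (histB bound).items.foldl (fun (nd : PySem.Dict Int Int) (qh : Int × Int) => nd.insert (sc.1 + qh.1) (nd.getD (sc.1 + qh.1) 0 + sc.2 * qh.2)) nd) nd).items)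
        = gsum g nd.items + (l.map (fun sc => ((histB bound).items.map (fun qh => (sc.2 * qh.2) * g (sc.1 + qh.1))).sum)).sum := by
      intro l
      induction l with
      | nil => intro nd _; simp
      | cons sc t iht =>
        intro nd hnd
        simp only [List.foldl_cons, List.map_cons, List.sum_cons]
        have hin : ((histB bound).items.foldl (fun (nd : PySem.Dict Int Int) (qh : Int × Int) => nd.insert (sc.1 + qh.1) (nd.getD (sc.1 + qh.1) 0 + sc.2 * qh.2)) nd).keys.Nodup :=
          nodup_foldl_insert_add (fun qh : Int × Int => sc.1 + qh.1) (fun qh : Int × Int => sc.2 * qh.2) _ _ hnd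
        rw [iht _ hin]
        have hstep : gsum g (((histB bound).items.foldl (fun (nd : PySem.Dict Int Int) (qh : Int × Int) => nd.insert (sc.1 + qh.1) (nd.getD (sc.1 + qh.1) 0 + sc.2 * qh.2)) nd).items)
            = gsum g nd.items + ((histB bound).items.map (fun qh => (sc.2 * qh.2) * g (sc.1 + qh.1))).sum :=
          gsum_foldl_insert_add g (fun qh : Int × Int => sc.1 + qh.1) (fun qh : Int × Int => sc.2 * qh.2) _ _ hnd
        rw [hstep]
        ring
    show gsum g (convStep (histB bound) (powerDist (histB bound) n)).items = _
    unfold convStep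
    rw [houter _ _ PySem.Dict.nodup_keys_empty,
        show gsum g (PySem.Dict.empty : PySem.Dict Int Int).items = 0 from by simp [gsum, dict_empty_items],
        zero_add]
    have h1 : ((powerDist (histB bound) n).items.map
          (fun sc => ((histB bound).items.map (fun qh => (sc.2 * qh.2) * g (sc.1 + qh.1))).sum)).sum
        = gsum (fun s => gsum (fun u => g (s + u)) (histB bound).items) (powerDist (histB bound) n).items := by
      simp only [gsum]
      congr 1
      apply List.map_congr_left
      intro sc _
      rw [show ((histB bound).items.map (fun qh => (sc.2 * qh.2) * g (sc.1 + qh.1)))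
            = ((histB bound).items.map (fun qh => sc.2 * (qh.2 * g (sc.1 + qh.1)))) from by
          apply List.map_congr_left; intro qh _; ring]
      rw [PySem.List.sum_map_const_mul_int]
    rw [h1, ihg]
    have h2 : ((pyProdRep (PySem.List.pyRange (-bound) (bound + 1) 1) n).map
          (fun v => (fun s => gsum (fun u => g (s + u)) (histB bound).items) (sumsq v))).sum
        = ((pyProdRep (PySem.List.pyRange (-bound) (bound + 1) 1) n).map
          (fun v => ((PySem.List.pyRange (-bound) (bound + 1) 1).map (fun x => g (sumsq v + x * x))).sum)).sum := by
      congr 1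
      apply List.map_congr_left
      intro v _
      exact gsum_histB bound (fun u => g (sumsq v + u))
    rw [h2]
    rw [show pyProdRep (PySem.List.pyRange (-bound) (bound + 1) 1) (n + 1)
          = (PySem.List.pyRange (-bound) (bound + 1) 1).flatMap
            (fun x => (pyProdRep (PySem.List.pyRange (-bound) (bound + 1) 1) n).map (fun v => x :: v)) from rfl]
    rw [List.map_flatMap, sum_flatMap]
    rw [sum_sum_comm _ _ (fun v x => g (sumsq v + x * x))]
    congr 1
    apply List.map_congr_left
    intro x _
    rw [List.map_map]
    congr 1
    apply List.map_congr_left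
    intro v _
    simp only [Function.comp, sumsq_cons]
    congr 1
    ring

-- A's pos/neg index count equals B's countP over diag
lemma filter_range_count (p : Int → Bool) (xs : List Int) :
    ((PySem.List.pyRange 0 (xs.length : Int) 1).filter (fun i => p (PySem.List.pyGetD xs i 0))).length
      = xs.countP p := by
  rw [← List.countP_eq_length_filter]
  conv_rhs => rw [← PySem.List.map_pyGetD_pyRange_zero' xs 0]
  rw [List.countP_map]
  rfl

lemma filter_range_count_pos (xs : List Int) :
    ((PySem.List.pyRange 0 (xs.length : Int) 1).filter (fun i => decide (0 < PySem.List.pyGetD xs i 0))).length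
      = xs.countP (fun x => decide (0 < x)) :=
  filter_range_count (fun x => decide (0 < x)) xs

lemma filter_range_count_neg (xs : List Int) :
    ((PySem.List.pyRange 0 (xs.length : Int) 1).filter (fun i => decide (PySem.List.pyGetD xs i 0 < 0))).length
      = xs.countP (fun x => decide (x < 0)) :=
  filter_range_count (fun x => decide (x < 0)) xs

-- A's counting dicts, read back through gsum
lemma gsum_counter (g : Int → Int) (L : List (List Int)) :
    gsum g ((L.foldl (fun dd v => dd.insert (sumsq v) (dd.getD (sumsq v) 0 + 1)) PySem.Dict.empty).items)
      = (L.map (fun v => g (sumsq v))).sum := by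
  rw [gsum_foldl_insert_add g sumsq (fun _ => 1) L _ PySem.Dict.nodup_keys_empty]
  simp [gsum, dict_empty_items]

-- A's final if-contains loop is the weighted items sum with weight getD (target + ·)
lemma foldl_if_contains (P : PySem.Dict Int Int) (t : Int) :
    ∀ (l : List (Int × Int)) (acc : Int),
    l.foldl (fun count p =>
      if P.contains (t + p.1) then count + p.2 * P.getD (t + p.1) 0 else count) acc
      = acc + gsum (fun s => P.getD (t + s) 0) l := by
  intro l
  induction l with
  | nil => intro acc; simp [gsum]
  | cons p r ih =>
    intro acc
    simp only [List.foldl_cons, gsum, List.map_cons, List.sum_cons]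
    by_cases hc : P.contains (t + p.1) = true
    · rw [if_pos hc, ih]
      simp only [gsum]
      ring
    · have hc' : P.contains (t + p.1) = false := by simpa using hc
      rw [if_neg (by simp [hc']), ih, PySem.Dict.getD_of_not_contains P 0 hc']
      simp only [gsum]
      ring

-- ===== VERDICT (by name: the statement is the Claim_ definition above) =====
theorem count_reps_large_spec : Claim_equal_count_reps_large := by
  intro diag target bound _
  unfold Spec_count_reps_large
  set R := PySem.List.pyRange (-bound) (bound + 1) 1 with hR
  set npos := diag.countP (fun x => decide (0 < x)) with hnpos
  set nneg := diag.countP (fun x => decide (x < 0)) with hnneg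
  -- the common closed form for both programs
  have key : ∀ (posD : PySem.Dict Int Int), posD.keys.Nodup →
      (∀ g : Int → Int, gsum g posD.items = ((pyProdRep R npos).map (fun w => g (sumsq w))).sum) →
      ∀ (negItems : List (Int × Int)),
      gsum (fun s => posD.getD (target + s) 0) negItems
        = gsum (fun s => ((pyProdRep R npos).map
            (fun w => if sumsq w = target + s then 1 else 0)).sum) negItems := by
    intro posD hnd hchar negItems
    simp only [gsum]
    congr 1
    apply List.map_congr_left
    intro p _
    rw [← gsum_indicator (target + p.1) posD hnd, hchar]
  -- A's side
  have hA : count_reps_large diag target bound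
      = gsum (fun s => ((pyProdRep R npos).map
          (fun w => if sumsq w = target + s then 1 else 0)).sum)
          (((pyProdRep R nneg).foldl
            (fun dd v => dd.insert (sumsq v) (dd.getD (sumsq v) 0 + 1)) PySem.Dict.empty).items) := by
    unfold count_reps_large
    rw [foldl_if_contains, zero_add, filter_range_count_pos, filter_range_count_neg,
        ← hR, ← hnpos, ← hnneg]
    exact key _ (nodup_foldl_insert_add sumsq (fun _ => 1) _ _ PySem.Dict.nodup_keys_empty)
      (fun g => gsum_counter g _) _
  -- B's side
  have hB : count_reps_large_alt diag target bound
      = gsum (fun s => ((pyProdRep R npos).map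
          (fun w => if sumsq w = target + s then 1 else 0)).sum)
          ((powerDist (histB bound) nneg).items) := by
    unfold count_reps_large_alt
    rw [← hnpos, ← hnneg]
    exact key _ (powerDist_inv bound npos).1 (powerDist_inv bound npos).2 _
  rw [hA, hB]
  rw [gsum_counter, (powerDist_inv bound nneg).2]
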